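-- pv_equiv track=rewrite | github.com/whytox/advent-of-code | day/2/sol2.py | is_invalid_id_2
-- ===== SOURCE A (Python) =====
-- def is_invalid_id_2(id):
--     # mappa divisori {2: [2], 3: [3], 4: [2, 4], 5: [5], 6: [2, 3, 6], 7: [7], 8: [2, 4, 8], 9: [9], 10: [2, 5, 10]}
--     id_s = str(id)
--     digits = len(id_s)
--     divisor = 2
--     while divisor <= digits:
--         if digits % divisor == 0: # se il numero di cifre è un divisibile per divisore
--             # divido il numero 'digits' in 'divisor' elementi
--             size = digits // divisor # la lunghezza degli split che vado a confrontare
-- #            splits = []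
-- #            for i in range(digits, step=size): # es: i = {0, 1} if divisor = 2
-- #                splits.append(digits[i:i+size])
--             splits = [id_s[i:i+size] for  i in range(0, digits, size)]
--             all_equals = True
--             for s in splits[1:]:
--                 if splits[0] != s:
--                     all_equals = False
--                     break
--             if all_equals:
--                 return True
--         divisor += 1
--     return False
-- ===== SOURCE B (Python) =====
-- def is_invalid_id_2(id):
--     s = str(id)
--     return s in (s + s)[1:-1]
-- ===== Notes on version B (the rewrite author's own statement) =====
-- stated objective: idiomatic
-- what changed: Replaces the divisor-enumerating split-and-compare loop with the classic string-doubling periodicity test: s is a repetition of a smaller block iff s occurs in (s+s)[1:-1].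
import Mathlib
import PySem

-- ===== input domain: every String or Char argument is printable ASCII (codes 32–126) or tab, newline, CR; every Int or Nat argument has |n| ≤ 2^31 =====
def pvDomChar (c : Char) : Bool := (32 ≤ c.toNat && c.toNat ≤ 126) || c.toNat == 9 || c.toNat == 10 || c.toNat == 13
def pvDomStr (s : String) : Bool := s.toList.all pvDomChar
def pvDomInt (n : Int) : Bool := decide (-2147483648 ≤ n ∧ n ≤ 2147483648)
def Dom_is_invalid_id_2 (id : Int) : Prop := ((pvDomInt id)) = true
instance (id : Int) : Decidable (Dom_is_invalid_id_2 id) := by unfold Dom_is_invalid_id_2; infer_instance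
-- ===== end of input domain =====

-- B replaces A's divisor-enumerating split-and-compare loop by the classic string-doubling
-- periodicity test `s in (s + s)[1:-1]` (idiomatic; same asymptotic cost on ≤ 11-digit inputs).

-- ===== PORT A =====
-- the inner `for s in splits[1:]` loop with its early break
def pvAllEqA (first : String) : List String → Bool
  | [] => true
  | s :: rest => if first ≠ s then false else pvAllEqA first rest

-- the `while divisor <= digits` loop; fuel = number of remaining values of `divisor`
def pvLoopA (id_s : String) (digits divisor : Int) : Nat → Bool
  | 0 => false
  | fuel + 1 =>
    if PySem.Int.mod digits divisor == 0 then
      let size := PySem.Int.floordiv digits divisor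
      let splits := (PySem.List.pyRange 0 digits size).map
        (fun i => PySem.Str.slice id_s (some i) (some (i + size)))
      let all_equals := pvAllEqA (PySem.List.pyGetD splits 0 "")
        (PySem.List.slice splits (some 1) none)
      if all_equals then true else pvLoopA id_s digits (divisor + 1) fuel
    else pvLoopA id_s digits (divisor + 1) fuel

def is_invalid_id_2 (id : Int) : Bool :=
  let id_s := PySem.Int.toStr id
  let digits := PySem.Str.len id_s
  pvLoopA id_s digits 2 (digits - 1).toNat

-- ===== PORT B =====
def is_invalid_id_2_alt (id : Int) : Bool :=
  let s := PySem.Int.toStr id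
  PySem.Str.isIn s (PySem.Str.slice (s ++ s) (some 1) (some (-1)))

-- ===== PRECONDITION & SPEC =====
def Spec_is_invalid_id_2 (id : Int) (out : Bool) : Prop := out = is_invalid_id_2_alt id
instance (id : Int) (out : Bool) : Decidable (Spec_is_invalid_id_2 id out) := by unfold Spec_is_invalid_id_2; infer_instance

-- ===== CLAIM (what is proved, stated in full; the proofs are below) =====
def Claim_equal_is_invalid_id_2 : Prop := ∀ (id : Int), Dom_is_invalid_id_2 id → Spec_is_invalid_id_2 id (is_invalid_id_2 id)

-- ===== LEMMAS AND PROOFS =====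

-- `cs` is a nontrivial repetition with block length `p`
def pvRep (cs : List Char) (p : Nat) : Prop :=
  0 < p ∧ p < cs.length ∧ p ∣ cs.length ∧ cs.HasPeriod p

-- str(n) is never empty
lemma pv_toDigitsCore_len_mono (b : Nat) : ∀ (f n : Nat) (ds : List Char),
    ds.length ≤ (Nat.toDigitsCore b f n ds).length := by
  intro f
  induction f with
  | zero => intro n ds; simp [Nat.toDigitsCore]
  | succ f ih =>
    intro n ds
    simp only [Nat.toDigitsCore]
    split
    · simp
    · calc ds.length ≤ (((n % b).digitChar :: ds)).length := by simp
        _ ≤ _ := ih _ _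

lemma pv_toDigits_ne_nil (b m : Nat) : Nat.toDigits b m ≠ [] := by
  have h : 1 ≤ (Nat.toDigits b m).length := by
    unfold Nat.toDigits
    simp only [Nat.toDigitsCore]
    split
    · simp
    · have := pv_toDigitsCore_len_mono b m (m / b) [(m % b).digitChar]
      simpa using this
  intro h0; simp [h0] at h

lemma pv_toChars_ne_nil (n : Int) : PySem.Int.toChars n ≠ [] := by
  unfold PySem.Int.toChars
  split
  · simp
  · exact pv_toDigits_ne_nil 10 n.toNat

-- rotation from a dividing period
lemma pv_rot_of_rep {cs : List Char} {p : Nat} (h : pvRep cs p) :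
    cs = cs.drop p ++ cs.take p := by
  obtain ⟨hp0, hpn, hdvd, hper⟩ := h
  have hmod := List.hasPeriod_iff_forall_getElem?_mod.mp hper
  have hmodp : ∀ {a b : Nat}, p ∣ b → (a + b) % p = a % p := by
    rintro a b ⟨c, rfl⟩; rw [Nat.add_mul_mod_self_left]
  apply List.ext_getElem?
  intro i
  by_cases hi : i < cs.length
  · by_cases h1 : i < cs.length - p
    · rw [List.getElem?_append_left (by simp; omega), List.getElem?_drop]
      rw [hmod i hi, hmod (p + i) (by omega)]
      congr 1
      have : p + i = i + p := by omega
      rw [this, Nat.add_mod_right]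
    · rw [List.getElem?_append_right (by simp; omega)]
      simp only [List.length_drop]
      rw [List.getElem?_take_of_lt (by omega), hmod i hi,
        hmod (i - (cs.length - p)) (by omega)]
      congr 1
      have hx : i - (cs.length - p) + (cs.length - p) = i := by omega
      conv_lhs => rw [← hx]
      rw [hmodp (Nat.dvd_sub hdvd dvd_rfl)]
  · rw [List.getElem?_eq_none (by omega), List.getElem?_eq_none (by simp; omega)]

-- a nontrivial rotation fix-point yields a dividing period (via Fine–Wilf)
lemma pv_rep_of_rot {cs : List Char} {k : Nat} (hk1 : 1 ≤ k) (hk2 : k < cs.length)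
    (h : cs = cs.drop k ++ cs.take k) : ∃ p, pvRep cs p := by
  have h1 : cs.HasPeriod k := by
    unfold List.HasPeriod
    nth_rewrite 3 [h]
    nth_rewrite 1 [← List.take_append_drop k cs]
    rw [List.prefix_append_right_inj]
    exact List.prefix_append _ _
  have h2 : cs.HasPeriod (cs.length - k) := by
    unfold List.HasPeriod
    have e : List.take (cs.length - k) cs = cs.drop k := by
      set nn := cs.length - k with hnn
      conv_lhs => rw [h]
      exact List.take_left' (by simp; omega)
    rw [e]
    nth_rewrite 1 [h]
    rw [List.prefix_append_right_inj]
    exact List.take_prefix _ _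
  have hg := h1.gcd h2 (by omega)
  refine ⟨Nat.gcd k (cs.length - k), Nat.gcd_pos_of_pos_left _ (by omega), ?_, ?_, hg⟩
  · exact lt_of_le_of_lt (Nat.gcd_le_left _ (by omega)) hk2
  · have hda : Nat.gcd k (cs.length - k) ∣ k + (cs.length - k) :=
      Nat.dvd_add (Nat.gcd_dvd_left _ _) (Nat.gcd_dvd_right _ _)
    rwa [show k + (cs.length - k) = cs.length by omega] at hda

-- the doubled-middle slice
lemma pv_middle (cs : List Char) (h : cs ≠ []) :
    PySem.List.slice (cs ++ cs) (some 1) (some (-1)) =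
      ((cs ++ cs).drop 1).take (2 * cs.length - 2) := by
  have hn : 1 ≤ cs.length := List.length_pos_iff.mpr h
  have e1 : PySem.List.clampIdx (cs.length + cs.length) 1 = 1 := by
    simp [PySem.List.clampIdx]; omega
  have e2 : PySem.List.clampIdx (cs.length + cs.length) (-1) = cs.length + cs.length - 1 := by
    simp only [PySem.List.clampIdx, if_pos (by omega : (-1:Int) < 0)]
    rw [if_neg (by omega)]
    omega
  simp only [PySem.List.slice, List.length_append, e1, e2]
  congr 1
  omega

-- B's test ↔ some nontrivial repetition
lemma pv_B_iff (cs : List Char) (h : cs ≠ []) :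
    PySem.Chars.isIn cs (PySem.List.slice (cs ++ cs) (some 1) (some (-1))) = true ↔
      ∃ p, pvRep cs p := by
  rw [PySem.Chars.isIn_iff_infix, pv_middle cs h]
  have hn : 1 ≤ cs.length := List.length_pos_iff.mpr h
  constructor
  · rintro ⟨s', t', hmid⟩
    have hpre : cs <+: (((cs ++ cs).drop 1).take (2 * cs.length - 2)).drop s'.length := by
      rw [← hmid, List.append_assoc, List.drop_left]
      exact List.prefix_append _ _
    rw [List.drop_take, List.drop_drop] at hpre
    rw [List.prefix_take_iff] at hpre
    obtain ⟨hpre', hlen⟩ := hpre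
    have hk1 : 1 ≤ s'.length + 1 := by omega
    have hk2 : s'.length + 1 < cs.length := by omega
    have hrot : cs = cs.drop (s'.length + 1) ++ cs.take (s'.length + 1) := by
      rw [List.drop_append_of_le_length (by omega)] at hpre'
      have heq := List.prefix_iff_eq_take.mp hpre'
      rw [List.take_append, List.take_of_length_le (by simp)] at heq
      rw [show cs.length - (List.drop (1 + s'.length) cs).length = 1 + s'.length from by
        rw [List.length_drop]; omega] at heq
      rw [Nat.add_comm 1 s'.length] at heq
      exact heq
    exact pv_rep_of_rot hk1 hk2 hrot
  · rintro ⟨p, hp0, hpn, hdvd, hper⟩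
    have hrot := pv_rot_of_rep ⟨hp0, hpn, hdvd, hper⟩
    have hpre : cs <+: (cs ++ cs).drop p := by
      rw [List.drop_append_of_le_length (le_of_lt hpn)]
      nth_rewrite 1 [hrot]
      rw [List.prefix_append_right_inj]
      exact List.take_prefix _ _
    have hpre2 : cs <+: (((cs ++ cs).drop 1).take (2 * cs.length - 2)).drop (p - 1) := by
      rw [List.drop_take, List.drop_drop]
      rw [show 1 + (p - 1) = p by omega]
      rw [List.prefix_take_iff]
      exact ⟨hpre, by omega⟩
    exact hpre2.isInfix.trans (List.drop_suffix _ _).isInfix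

-- all blocks equal the first block ↔ period p  (n = p * m)
lemma pv_blocks_iff (cs : List Char) (p m : Nat) (hp : 0 < p) (hm : cs.length = p * m) :
    (∀ k < m, (cs.drop (p * k)).take p = cs.take p) ↔ cs.HasPeriod p := by
  have hblockElem : ∀ j r : Nat, ((cs.drop (p * j)).take p)[r]? =
      if r < p then cs[p * j + r]? else none := by
    intro j r
    by_cases hr : r < p
    · rw [if_pos hr, List.getElem?_take_of_lt hr, List.getElem?_drop]
    · rw [if_neg hr, List.getElem?_eq_none (by simp; omega)]
  constructor
  · intro hb
    rw [List.hasPeriod_iff_getElem?]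
    intro i hi
    have hblock : ∀ j r : Nat, j < m → r < p → cs[p * j + r]? = cs[r]? := by
      intro j r hj hr
      have h1 := hblockElem j r
      rw [if_pos hr, hb j hj, List.getElem?_take_of_lt hr] at h1
      exact h1.symm
    obtain ⟨j, r, hr, rfl⟩ : ∃ j r, r < p ∧ i = p * j + r :=
      ⟨i / p, i % p, Nat.mod_lt _ hp, (Nat.div_add_mod i p).symm⟩
    have hi' : p * j + r < p * m - p := by rw [hm] at hi; omega
    have hstep : p * (j + 1) = p * j + p := by rw [Nat.mul_add, Nat.mul_one]
    have hj : j + 1 < m := by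
      by_contra hc
      have hmj : p * m ≤ p * (j + 1) := Nat.mul_le_mul le_rfl (by omega)
      omega
    have e1 := hblock j r (by omega) hr
    have e2 := hblock (j + 1) r hj hr
    have e3 : p * (j + 1) + r = p * j + r + p := by omega
    rw [e3] at e2
    exact e1.trans e2.symm
  · intro hper k hk
    have hmod := List.hasPeriod_iff_forall_getElem?_mod.mp hper
    apply List.ext_getElem?
    intro r
    rw [hblockElem k r]
    by_cases hr : r < p
    · rw [if_pos hr, List.getElem?_take_of_lt hr]
      have hlt : p * k + r < cs.length := by rw [hm]; nlinarith
      rw [hmod (p * k + r) hlt, hmod r (by omega)]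
      congr 1
      rw [Nat.add_comm, Nat.add_mul_mod_self_left]
    · rw [if_neg hr, List.getElem?_eq_none (by simp; omega)]

-- the inner all-equal loop
lemma pv_allEqA_iff (first : String) (l : List String) :
    pvAllEqA first l = true ↔ ∀ s ∈ l, first = s := by
  induction l with
  | nil => simp [pvAllEqA]
  | cons s rest ih =>
    simp only [pvAllEqA, List.mem_cons]
    split
    · simp_all
    · rw [ih]
      rename_i hns
      rw [not_not] at hns
      constructor
      · rintro h t (rfl | ht)
        · exact hns
        · exact h t ht
      · intro h t ht; exact h t (Or.inr ht)

-- one body condition of A's while loop, for a divisor d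
def pvCondA (id_s : String) (digits d : Int) : Prop :=
  PySem.Int.mod digits d = 0 ∧
    pvAllEqA
      (PySem.List.pyGetD ((PySem.List.pyRange 0 digits (PySem.Int.floordiv digits d)).map
        (fun i => PySem.Str.slice id_s (some i) (some (i + PySem.Int.floordiv digits d)))) 0 "")
      (PySem.List.slice ((PySem.List.pyRange 0 digits (PySem.Int.floordiv digits d)).map
        (fun i => PySem.Str.slice id_s (some i) (some (i + PySem.Int.floordiv digits d)))) (some 1) none) = true

-- A's while loop returns true iff some remaining divisor satisfies the body condition
lemma pv_loopA_iff (id_s : String) (digits : Int) : ∀ (fuel : Nat) (divisor : Int),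
    fuel = (digits - divisor + 1).toNat →
    (pvLoopA id_s digits divisor fuel = true ↔
      ∃ d : Int, divisor ≤ d ∧ d ≤ digits ∧ pvCondA id_s digits d) := by
  intro fuel
  induction fuel with
  | zero =>
    intro divisor hf
    simp only [pvLoopA]
    constructor
    · intro h; cases h
    · rintro ⟨d, h1, h2, _⟩; omega
  | succ fuel ih =>
    intro divisor hf
    have hdd : divisor ≤ digits := by omega
    have ih' := ih (divisor + 1) (by omega)
    simp only [pvLoopA]
    by_cases hm : PySem.Int.mod digits divisor = 0
    · rw [if_pos (by simpa using hm)]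
      by_cases hE : pvAllEqA
          (PySem.List.pyGetD ((PySem.List.pyRange 0 digits (PySem.Int.floordiv digits divisor)).map
            (fun i => PySem.Str.slice id_s (some i) (some (i + PySem.Int.floordiv digits divisor)))) 0 "")
          (PySem.List.slice ((PySem.List.pyRange 0 digits (PySem.Int.floordiv digits divisor)).map
            (fun i => PySem.Str.slice id_s (some i) (some (i + PySem.Int.floordiv digits divisor)))) (some 1) none) = true
      · rw [if_pos hE]
        simp only [true_iff]
        exact ⟨divisor, le_refl _, hdd, hm, hE⟩
      · rw [if_neg hE]
        rw [ih']
        constructor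
        · rintro ⟨d, h1, h2, hc⟩; exact ⟨d, by omega, h2, hc⟩
        · rintro ⟨d, h1, h2, hc⟩
          rcases eq_or_lt_of_le h1 with rfl | hlt
          · exact absurd hc.2 hE
          · exact ⟨d, by omega, h2, hc⟩
    · rw [if_neg (by simpa using hm)]
      rw [ih']
      constructor
      · rintro ⟨d, h1, h2, hc⟩; exact ⟨d, by omega, h2, hc⟩
      · rintro ⟨d, h1, h2, hc⟩
        rcases eq_or_lt_of_le h1 with rfl | hlt
        · exact absurd hc.1 hm
        · exact ⟨d, by omega, h2, hc⟩

-- A's body condition for divisor d ↔ period n / d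
lemma pv_condA_iff (id_s : String) (d : Int) (h2 : 2 ≤ d) (hd : d ≤ (id_s.toList.length : Int)) :
    pvCondA id_s (id_s.toList.length : Int) d ↔
      (d ∣ (id_s.toList.length : Int) ∧
        id_s.toList.HasPeriod (id_s.toList.length / d.toNat)) := by
  unfold pvCondA
  rw [PySem.Int.mod_eq_zero_iff_dvd]
  apply and_congr_right
  intro hdvd
  have hdN : d = ((d.toNat : Nat) : Int) := (Int.toNat_of_nonneg (by omega)).symm
  have hD2 : 2 ≤ d.toNat := by omega
  have hDn : d.toNat ≤ id_s.toList.length := by omega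
  have hdvdN : d.toNat ∣ id_s.toList.length := by
    rw [hdN, Int.natCast_dvd_natCast] at hdvd; exact hdvd
  have hp0 : 0 < id_s.toList.length / d.toNat := Nat.div_pos hDn (by omega)
  have hnpD : id_s.toList.length = (id_s.toList.length / d.toNat) * d.toNat :=
    (Nat.div_mul_cancel hdvdN).symm
  set p := id_s.toList.length / d.toNat with hp
  set n := id_s.toList.length with hn
  have hGblock : ∀ k : Nat,
      (PySem.Str.slice id_s (some ((p:Int) * (k:Int))) (some ((p:Int) * (k:Int) + (p:Int)))).toList
      = (id_s.toList.drop (p * k)).take p := by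
    intro k
    rw [PySem.Str.toList_slice]
    simp only [PySem.Chars.slice_eq_listSlice]
    rw [show ((p:Int) * (k:Int)) = ((p * k : Nat) : Int) from by push_cast; ring,
      show (((p * k : Nat) : Int) + (p:Int)) = ((p * k + p : Nat) : Int) from by push_cast; ring,
      PySem.List.slice_natCast]
    congr 1
    omega
  have hsize : PySem.Int.floordiv (n : Int) d = (p : Int) := by
    rw [PySem.Int.floordiv_eq_ediv_of_pos (by omega), hdN, hp, hn]
    exact Int.natCast_ediv _ _
  rw [hsize]
  have hrange : PySem.List.pyRange 0 (n : Int) ((p : Nat) : Int) =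
      (List.range d.toNat).map (fun k : Nat => (p : Int) * (k : Int)) := by
    rw [PySem.List.pyRange_of_pos _ _ (by exact_mod_cast hp0)]
    rw [if_pos (by exact_mod_cast (show 0 < n by omega))]
    have hcount : (((n : Int) - 0 + (p:Int) - 1) / (p:Int)).toNat = d.toNat := by
      rw [show ((n:Int) - 0 + (p:Int) - 1) = (((n + p - 1 : Nat)) : Int) from by omega]
      rw [← Int.natCast_ediv, Int.toNat_natCast]
      rw [show n + p - 1 = p - 1 + p * d.toNat from by omega]
      rw [Nat.add_mul_div_left _ _ (show 0 < p from hp0)]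
      rw [Nat.div_eq_of_lt (by omega)]
      omega
    rw [hcount]
    apply List.map_congr_left
    intro k _
    omega
  rw [hrange, List.map_map]
  obtain ⟨D', hD'⟩ : ∃ D', d.toNat = D' + 1 := ⟨d.toNat - 1, by omega⟩
  rw [hD', List.range_succ_eq_map, List.map_cons, List.map_map]
  rw [PySem.List.slice_from_one, List.tail_cons]
  rw [PySem.List.pyGetD_zero, List.getD_cons_zero]
  rw [pv_allEqA_iff]
  rw [← pv_blocks_iff id_s.toList p (D' + 1) hp0 (by rw [← hD', ← hn]; exact hnpD)]
  constructor
  · intro hall k hk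
    match k with
    | 0 => simp
    | (k' + 1) =>
      have hmem : ((fun k : Nat => PySem.Str.slice id_s (some ((p:Int) * (k:Int)))
          (some ((p:Int) * (k:Int) + (p:Int)))) ∘ Nat.succ) k' ∈
          (List.range D').map ((fun k : Nat => PySem.Str.slice id_s (some ((p:Int) * (k:Int)))
          (some ((p:Int) * (k:Int) + (p:Int)))) ∘ Nat.succ) :=
        List.mem_map_of_mem (List.mem_range.mpr (by omega))
      have heq := hall _ hmem
      have := congrArg String.toList heq
      simp only [Function.comp] at this
      rw [hGblock, hGblock] at this
      simp only [Nat.mul_zero, List.drop_zero] at this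
      rw [show Nat.succ k' = k' + 1 from rfl] at this
      exact this.symm
  · intro hb s hs
    obtain ⟨k', hk', rfl⟩ := List.mem_map.mp hs
    rw [← String.toList_inj]
    simp only [Function.comp]
    rw [hGblock, hGblock]
    simp only [Nat.mul_zero, List.drop_zero]
    rw [hb (Nat.succ k') (by simp at hk'; omega)]

-- A returns true ↔ some nontrivial repetition
lemma pv_A_iff (id_s : String) (h : id_s.toList ≠ []) :
    pvLoopA id_s (PySem.Str.len id_s) 2 ((PySem.Str.len id_s) - 1).toNat = true ↔
      ∃ p, pvRep id_s.toList p := by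
  have hn1 : 1 ≤ id_s.toList.length := List.length_pos_iff.mpr h
  rw [PySem.Str.len_eq]
  rw [pv_loopA_iff id_s (id_s.toList.length : Int) (((id_s.toList.length : Int)) - 1).toNat 2
    (by omega)]
  constructor
  · rintro ⟨d, hd2, hdn, hc⟩
    rw [pv_condA_iff id_s d hd2 hdn] at hc
    obtain ⟨hdvd, hper⟩ := hc
    have hdvdN : d.toNat ∣ id_s.toList.length := by
      rw [(Int.toNat_of_nonneg (show (0:Int) ≤ d by omega)).symm, Int.natCast_dvd_natCast] at hdvd
      exact hdvd
    obtain ⟨c, hcc⟩ := hdvdN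
    have hD2 : 2 ≤ d.toNat := by omega
    have hnp : id_s.toList.length / d.toNat = c := by
      rw [hcc]; exact Nat.mul_div_cancel_left c (by omega)
    have hc0 : 0 < c := by
      rcases Nat.eq_zero_or_pos c with rfl | hpos
      · omega
      · exact hpos
    have h2c : 2 * c ≤ d.toNat * c := Nat.mul_le_mul hD2 le_rfl
    refine ⟨c, hc0, by omega, ⟨d.toNat, by rw [hcc]; ring⟩, ?_⟩
    rw [hnp] at hper
    exact hper
  · rintro ⟨p, hp0, hpn, hdvd, hper⟩
    obtain ⟨m, hm⟩ := hdvd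
    have hnp : id_s.toList.length / p = m := by
      rw [hm]; exact Nat.mul_div_cancel_left m hp0
    have hm2 : 2 ≤ m := by
      by_contra hc
      have h1 : p * m ≤ p * 1 := Nat.mul_le_mul le_rfl (by omega)
      omega
    have hmn : m ≤ id_s.toList.length := by
      have h1 : 1 * m ≤ p * m := Nat.mul_le_mul hp0 le_rfl
      omega
    refine ⟨((m : Nat) : Int), by omega, by omega, ?_⟩
    rw [pv_condA_iff id_s _ (by omega) (by omega)]
    constructor
    · rw [Int.natCast_dvd_natCast]
      exact ⟨p, by rw [hm]; ring⟩
    · rw [Int.toNat_natCast]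
      rw [show id_s.toList.length / m = p from by
        rw [hm]; exact Nat.mul_div_cancel p (by omega)]
      exact hper

-- ===== VERDICT (by name: the statement is the Claim_ definition above) =====
theorem is_invalid_id_2_spec : Claim_equal_is_invalid_id_2 := by
  intro id _
  unfold Spec_is_invalid_id_2 is_invalid_id_2 is_invalid_id_2_alt
  have hne : (PySem.Int.toStr id).toList ≠ [] := by
    rw [PySem.Int.toList_toStr]; exact pv_toChars_ne_nil id
  have hA := pv_A_iff (PySem.Int.toStr id) hne
  have hB : PySem.Str.isIn (PySem.Int.toStr id)
      (PySem.Str.slice (PySem.Int.toStr id ++ PySem.Int.toStr id) (some 1) (some (-1))) = true ↔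
      ∃ p, pvRep (PySem.Int.toStr id).toList p := by
    rw [PySem.Str.isIn_iff_infix]
    have : (PySem.Str.slice (PySem.Int.toStr id ++ PySem.Int.toStr id) (some 1) (some (-1))).toList
        = PySem.List.slice ((PySem.Int.toStr id).toList ++ (PySem.Int.toStr id).toList) (some 1) (some (-1)) := by
      rw [PySem.Str.toList_slice, String.toList_append]
      simp [PySem.Chars.slice_eq_listSlice]
    rw [this, ← PySem.Chars.isIn_iff_infix]
    exact pv_B_iff _ hne
  simp only at hA hB ⊢
  rw [Bool.eq_iff_iff, hA, hB]
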